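-- pv_equiv track=rewrite | github.com/aniruddhapdeshpande99/WikiData-To-WikiPages | Source/generate_template_wikipages.py | retrieve_remaining_sentence_template
-- ===== SOURCE A (Python) =====
-- def retrieve_remaining_sentence_template(remaining_template_tags, remaining_article_props, en_prop_key):
--     matching_template = ""
--     max_template_size = 0
--
--     for remaining_sent in remaining_template_tags.keys():
--         tags  = remaining_template_tags[remaining_sent]
--         hi_tags = [en_prop_key[tag] for tag in tags]
--
--         if set(hi_tags) <= set(remaining_article_props) and len(hi_tags) > max_template_size:
--             max_template_size = len(hi_tags)
--             matching_template = remaining_sent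
--
--     return matching_template
-- ===== SOURCE B (Python) =====
-- def retrieve_remaining_sentence_template(remaining_template_tags, remaining_article_props, en_prop_key):
--     props = set(remaining_article_props)
--     pairs = [(key, [en_prop_key[tag] for tag in tags])
--              for key, tags in remaining_template_tags.items()]
--     # stable descending sort by tag count: ties keep original dict order
--     ordered = sorted(pairs, key=lambda kv: len(kv[1]), reverse=True)
--     for key, hi_tags in ordered:
--         if hi_tags and set(hi_tags) <= props:
--             return key
--     return ""
-- ===== Notes on version B (the rewrite author's own statement) =====
-- stated objective: alternative
-- what changed: A keeps a running (best key, max size) pair updated conditionally in one pass; B sorts the (key, mapped tags) pairs by descending tag count with Python's stable sort and returns the first pair in that order whose non-empty tag set is a subset of the article props.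
import Mathlib
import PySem

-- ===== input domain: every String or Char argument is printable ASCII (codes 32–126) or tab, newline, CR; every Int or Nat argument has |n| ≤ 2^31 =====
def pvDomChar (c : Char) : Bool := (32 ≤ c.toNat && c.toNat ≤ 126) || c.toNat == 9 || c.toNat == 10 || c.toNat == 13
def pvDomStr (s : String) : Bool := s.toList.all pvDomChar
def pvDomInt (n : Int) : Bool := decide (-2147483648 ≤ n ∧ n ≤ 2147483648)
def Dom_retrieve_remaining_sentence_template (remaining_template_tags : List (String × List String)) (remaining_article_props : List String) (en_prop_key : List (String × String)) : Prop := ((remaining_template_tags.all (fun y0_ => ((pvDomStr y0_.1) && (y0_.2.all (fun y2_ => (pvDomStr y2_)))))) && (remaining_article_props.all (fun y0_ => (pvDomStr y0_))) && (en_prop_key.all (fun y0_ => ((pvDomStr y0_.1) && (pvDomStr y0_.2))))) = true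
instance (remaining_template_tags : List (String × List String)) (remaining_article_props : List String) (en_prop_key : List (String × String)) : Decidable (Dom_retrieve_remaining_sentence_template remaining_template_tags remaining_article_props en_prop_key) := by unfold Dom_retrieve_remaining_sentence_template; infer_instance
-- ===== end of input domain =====

-- B replaces A's running-max single pass by a stable descending sort on tag count followed by a
-- first-match scan — an alternative algorithm of similar cost.

-- ===== PORT A =====
-- literal port: loop over the dict's keys tracking (matching_template, max_template_size);
-- en_prop_key[tag] is ported as getD — the KeyError inputs are excluded by Pre_ below
def retrieve_remaining_sentence_template (remaining_template_tags : List (String × List String)) (remaining_article_props : List String) (en_prop_key : List (String × String)) : String :=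
  ((PySem.Dict.ofList remaining_template_tags).keys.foldl
    (fun (st : String × Nat) remaining_sent =>
      let tags := (PySem.Dict.ofList remaining_template_tags).getD remaining_sent []
      let hi_tags := tags.map (fun tag => (PySem.Dict.ofList en_prop_key).getD tag "")
      if PySem.Set.issubset (PySem.Set.ofList hi_tags) (PySem.Set.ofList remaining_article_props)
          && decide (st.2 < hi_tags.length)
      then (remaining_sent, hi_tags.length)
      else st)
    ("", 0)).1

-- ===== PORT B =====
-- sort the (key, mapped tags) pairs by descending tag count (stable), return the first eligible one
def retrieve_remaining_sentence_template_alt (remaining_template_tags : List (String × List String)) (remaining_article_props : List String) (en_prop_key : List (String × String)) : String :=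
  let props := PySem.Set.ofList remaining_article_props
  let pairs := (PySem.Dict.ofList remaining_template_tags).items.map
      (fun kv => (kv.1, kv.2.map (fun tag => (PySem.Dict.ofList en_prop_key).getD tag "")))
  let ordered := PySem.List.sorted pairs (fun kv => kv.2.length) true
  match ordered.find?
      (fun kv => !kv.2.isEmpty && PySem.Set.issubset (PySem.Set.ofList kv.2) props) with
  | some kv => kv.1
  | none => ""

-- ===== PRECONDITION & SPEC =====
-- Pre_ excludes exactly the inputs on which the Python A raises KeyError:
-- some tag of a live (not overwritten by a duplicate key) template entry is missing from en_prop_key.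
def Pre_retrieve_remaining_sentence_template (remaining_template_tags : List (String × List String)) (remaining_article_props : List String) (en_prop_key : List (String × String)) : Prop :=
  ∀ kv ∈ (PySem.Dict.ofList remaining_template_tags).items, ∀ tag ∈ kv.2,
    (PySem.Dict.ofList en_prop_key).contains tag = true
instance (remaining_template_tags : List (String × List String)) (remaining_article_props : List String) (en_prop_key : List (String × String)) : Decidable (Pre_retrieve_remaining_sentence_template remaining_template_tags remaining_article_props en_prop_key) := by unfold Pre_retrieve_remaining_sentence_template; infer_instance
def pvWitness_retrieve_remaining_sentence_template : (List (String × List String)) × List String × (List (String × String)) :=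
  ([("s1", ["p1", "p2"]), ("s2", ["p1"])], ["x", "y"], [("p1", "x"), ("p2", "y")])
def Spec_retrieve_remaining_sentence_template (remaining_template_tags : List (String × List String)) (remaining_article_props : List String) (en_prop_key : List (String × String)) (out : String) : Prop := out = retrieve_remaining_sentence_template_alt remaining_template_tags remaining_article_props en_prop_key
instance (remaining_template_tags : List (String × List String)) (remaining_article_props : List String) (en_prop_key : List (String × String)) (out : String) : Decidable (Spec_retrieve_remaining_sentence_template remaining_template_tags remaining_article_props en_prop_key out) := by unfold Spec_retrieve_remaining_sentence_template; infer_instance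

-- ===== CLAIM (what is proved, stated in full; the proofs are below) =====
def Claim_equal_retrieve_remaining_sentence_template : Prop := ∀ (remaining_template_tags : List (String × List String)) (remaining_article_props : List String) (en_prop_key : List (String × String)), Dom_retrieve_remaining_sentence_template remaining_template_tags remaining_article_props en_prop_key → Pre_retrieve_remaining_sentence_template remaining_template_tags remaining_article_props en_prop_key → Spec_retrieve_remaining_sentence_template remaining_template_tags remaining_article_props en_prop_key (retrieve_remaining_sentence_template remaining_template_tags remaining_article_props en_prop_key)

-- ===== LEMMAS AND PROOFS =====

-- inserting x into a length-nonincreasing list: where the first match of p lands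
lemma pv_find_insert (x : String × List String) (s : List (String × List String))
    (hs : s.Pairwise (fun a b => b.2.length ≤ a.2.length))
    (p : (String × List String) → Bool) :
    (PySem.List.insertBy (fun a b => decide (b.2.length < a.2.length)) x s).find? p =
      match s.find? p with
      | some m => if decide (m.2.length < x.2.length) && p x then some x else some m
      | none => if p x then some x else none := by
  induction s with
  | nil =>
      by_cases hp : p x = true <;> simp [PySem.List.insertBy, List.find?, hp]
  | cons y ys ih =>
      rcases List.pairwise_cons.mp hs with ⟨hy, hys⟩
      by_cases hb : y.2.length < x.2.length
      · -- x goes in front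
        have : PySem.List.insertBy (fun a b => decide (b.2.length < a.2.length)) x (y :: ys)
            = x :: y :: ys := by simp [PySem.List.insertBy, hb]
        rw [this]
        cases hf : (y :: ys).find? p with
        | none =>
            by_cases hp : p x = true <;> simp [hp, hf]
        | some m =>
            have hmem : m = y ∨ m ∈ ys := by
              have := List.mem_of_find?_eq_some hf
              simpa using this
            have hlt : m.2.length < x.2.length := by
              rcases hmem with h | h
              · simpa [h] using hb
              · exact lt_of_le_of_lt (hy m h) hb
            by_cases hp : p x = true <;> simp [hp, hf, hlt]
      · -- x goes after y
        have : PySem.List.insertBy (fun a b => decide (b.2.length < a.2.length)) x (y :: ys)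
            = y :: PySem.List.insertBy (fun a b => decide (b.2.length < a.2.length)) x ys := by
          simp [PySem.List.insertBy, hb]
        rw [this]
        by_cases hpy : p y = true
        · have hnot : ¬ (y.2.length < x.2.length) := hb
          simp [hpy, hnot]
        · simp only [List.find?_cons, Bool.not_eq_true] at hpy ⊢
          rw [hpy]
          rw [ih hys]

-- the running-max fold state mirrors the first match of the sorted-insert list
lemma pv_inv (q : (String × List String) → Bool) (L : List (String × List String)) :
    (match (L.foldl (fun acc x =>
          PySem.List.insertBy (fun a b => decide (b.2.length < a.2.length)) x acc) []).find?
        (fun kv => !kv.2.isEmpty && q kv) with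
      | some m =>
          L.foldl (fun st kv =>
            if q kv && decide (st.2 < kv.2.length) then (kv.1, kv.2.length) else st)
            (("", 0) : String × Nat) = (m.1, m.2.length)
      | none =>
          L.foldl (fun st kv =>
            if q kv && decide (st.2 < kv.2.length) then (kv.1, kv.2.length) else st)
            (("", 0) : String × Nat) = ("", 0)) := by
  induction L using List.reverseRecOn with
  | nil => simp
  | append_singleton L x ih =>
      have hsort : L.foldl (fun acc x =>
          PySem.List.insertBy (fun a b => decide (b.2.length < a.2.length)) x acc) []
          = PySem.List.sorted L (fun kv => kv.2.length) true :=
        (PySem.List.sorted_rev_eq_foldl_insertBy L (fun kv => kv.2.length)).symm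
      have hpw : (L.foldl (fun acc x =>
          PySem.List.insertBy (fun a b => decide (b.2.length < a.2.length)) x acc) []).Pairwise
            (fun a b => b.2.length ≤ a.2.length) := by
        rw [hsort]; exact PySem.List.sorted_pairwise_rev L (fun kv => kv.2.length)
      rw [List.foldl_append, List.foldl_append]
      simp only [List.foldl_cons, List.foldl_nil]
      rw [pv_find_insert x _ hpw]
      revert ih
      cases hf : (L.foldl (fun acc x =>
          PySem.List.insertBy (fun a b => decide (b.2.length < a.2.length)) x acc) []).find?
          (fun kv => !kv.2.isEmpty && q kv) with
      | none =>
          intro ih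
          rw [ih]
          by_cases hq : q x = true
          · by_cases hne : x.2.isEmpty = true
            · have h0 : x.2.length = 0 := by simpa [List.isEmpty_iff, List.length_eq_zero_iff] using hne
              simp [hq, hne, h0]
            · have h0 : 0 < x.2.length := by
                have := List.isEmpty_eq_false_iff.mp (by simpa using hne)
                exact List.length_pos_of_ne_nil this
              simp [hq, hne, h0]
          · simp [hq]
      | some m =>
          intro ih
          rw [ih]
          have hm0 : (0:Nat) ≤ m.2.length := Nat.zero_le _
          by_cases hlt : m.2.length < x.2.length
          · by_cases hq : q x = true
            · by_cases hne : x.2.isEmpty = true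
              · have h0 : x.2.length = 0 := by simpa [List.isEmpty_iff, List.length_eq_zero_iff] using hne
                exact absurd hlt (by omega)
              · simp [hq, hne, hlt]
            · simp [hq, hlt]
          · by_cases hq : q x = true
            · simp [hq, hlt]
            · simp [hq, hlt]

-- main bridge: the running-max fold equals first-match on the descending-sorted list
lemma pv_main (q : (String × List String) → Bool) (L : List (String × List String)) :
    (L.foldl (fun st kv =>
        if q kv && decide (st.2 < kv.2.length) then (kv.1, kv.2.length) else st)
        (("", 0) : String × Nat)).1
      = match (PySem.List.sorted L (fun kv => kv.2.length) true).find?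
            (fun kv => !kv.2.isEmpty && q kv) with
        | some m => m.1
        | none => "" := by
  have h := pv_inv q L
  rw [PySem.List.sorted_rev_eq_foldl_insertBy]
  revert h
  cases hf : (L.foldl (fun acc x =>
      PySem.List.insertBy (fun a b => decide (b.2.length < a.2.length)) x acc) []).find?
      (fun kv => !kv.2.isEmpty && q kv) with
  | none => intro h; rw [h]
  | some m => intro h; rw [h]

-- ===== VERDICT (by name: the statement is the Claim_ definition above) =====
theorem retrieve_remaining_sentence_template_spec : Claim_equal_retrieve_remaining_sentence_template := by
  intro rtt props epk _ _
  unfold Spec_retrieve_remaining_sentence_template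
  unfold retrieve_remaining_sentence_template retrieve_remaining_sentence_template_alt
  have hmain := pv_main
    (fun kv => PySem.Set.issubset (PySem.Set.ofList kv.2) (PySem.Set.ofList props))
    ((PySem.Dict.ofList rtt).items.map
      (fun kv => (kv.1, kv.2.map (fun tag => (PySem.Dict.ofList epk).getD tag ""))))
  rw [PySem.Dict.items_eq_map_keys (PySem.Dict.ofList rtt)
        (PySem.Dict.nodup_keys_ofList rtt) [], List.map_map, List.foldl_map] at hmain
  rw [PySem.Dict.items_eq_map_keys (PySem.Dict.ofList rtt)
        (PySem.Dict.nodup_keys_ofList rtt) [], List.map_map]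
  simp only [Function.comp_def] at hmain ⊢
  exact hmain
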